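-- pv_equiv track=rewrite | github.com/LPRowe/coding-interview-practice | arcade/the-core/easy/lineUp.py | lineUp
-- ===== SOURCE A (Python) =====
-- def lineUp(commands):
--     direction={'L':1,
--                'R':-1,
--                'A':2
--                }
--
--     smart_student,confused_student=0,0
--     correct_count=0
--     for command in commands:
--         if command=='A':
--             smart_student+=direction[command]
--             confused_student+=direction[command]
--         else:
--             smart_student+=direction[command]
--             confused_student-=direction[command]
--
--         if smart_student%4==confused_student%4:
--             correct_count+=1
--
--     return(correct_count)
-- ===== SOURCE B (Python) =====
-- def lineUp(commands):
--     # The two students agree exactly when the number of turn commands seen so far is even: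
--     # track one parity bit instead of two positions.
--     turn = {'L': True, 'R': True, 'A': False}
--     odd = False
--     count = 0
--     for command in commands:
--         odd ^= turn[command]
--         count += not odd
--     return count
-- ===== Notes on version B (the rewrite author's own statement) =====
-- stated objective: simpler
-- what changed: B drops the two running positions and the mod-4 comparison and keeps a single parity bit driven by a command-to-turn table (the students agree exactly when the number of turn commands seen so far is even).
import Mathlib
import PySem

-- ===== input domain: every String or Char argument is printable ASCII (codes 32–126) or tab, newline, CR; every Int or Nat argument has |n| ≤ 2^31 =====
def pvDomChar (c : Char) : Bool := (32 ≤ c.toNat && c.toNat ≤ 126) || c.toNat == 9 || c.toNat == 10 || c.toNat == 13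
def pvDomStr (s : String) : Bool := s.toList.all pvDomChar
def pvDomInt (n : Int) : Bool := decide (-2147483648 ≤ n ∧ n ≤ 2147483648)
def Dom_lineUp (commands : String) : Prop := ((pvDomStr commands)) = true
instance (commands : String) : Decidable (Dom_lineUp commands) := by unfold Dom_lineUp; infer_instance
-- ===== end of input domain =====

-- B replaces the direction dict and the two running positions by a single parity bit
-- (number of L/R turns seen so far), counting commands where it is even: simpler, same O(n) cost.


-- ===== PORT A =====
-- direction dict; lookup with default 0 — under Pre_ every command is a key, so the default is never used
-- (Python raises KeyError on other characters; Pre_ excludes them).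
def lineUpDirection : PySem.Dict Char Int := PySem.Dict.ofList [('L', 1), ('R', -1), ('A', 2)]

def lineUpStepA (st : Int × Int × Int) (command : Char) : Int × Int × Int :=
  let smart := st.1; let confused := st.2.1; let cnt := st.2.2
  let (smart, confused) :=
    if command = 'A' then
      (smart + PySem.Dict.getD lineUpDirection command 0,
       confused + PySem.Dict.getD lineUpDirection command 0)
    else
      (smart + PySem.Dict.getD lineUpDirection command 0,
       confused - PySem.Dict.getD lineUpDirection command 0)
  if PySem.Int.mod smart 4 = PySem.Int.mod confused 4 then (smart, confused, cnt + 1)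
  else (smart, confused, cnt)

def lineUp (commands : String) : Int :=
  (commands.toList.foldl lineUpStepA (0, 0, 0)).2.2

-- ===== PORT B =====
-- turn table: does this command flip the parity of turns seen so far?
-- (lookup raises KeyError on other characters, like A's direction dict; Pre_ excludes them)
def lineUpTurn : PySem.Dict Char Bool := PySem.Dict.ofList [('L', true), ('R', true), ('A', false)]

def lineUpStepB (st : Int × Bool) (command : Char) : Int × Bool :=
  let odd := xor st.2 (PySem.Dict.getD lineUpTurn command false)
  (st.1 + (if odd then 0 else 1), odd)

def lineUp_alt (commands : String) : Int :=
  (commands.toList.foldl lineUpStepB (0, false)).1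

-- ===== PRECONDITION & SPEC =====
-- Pre_ excludes exactly the inputs where A raises KeyError: a command other than 'L', 'R', 'A'.
def Pre_lineUp (commands : String) : Prop :=
  commands.toList.all (fun c => c == 'L' || c == 'R' || c == 'A') = true
instance (commands : String) : Decidable (Pre_lineUp commands) := by unfold Pre_lineUp; infer_instance
def pvWitness_lineUp : String := "LLARL"

def Spec_lineUp (commands : String) (out : Int) : Prop := out = lineUp_alt commands
instance (commands : String) (out : Int) : Decidable (Spec_lineUp commands out) := by unfold Spec_lineUp; infer_instance

-- ===== CLAIM (what is proved, stated in full; the proofs are below) =====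
def Claim_equal_lineUp : Prop := ∀ (commands : String), Dom_lineUp commands → Pre_lineUp commands → Spec_lineUp commands (lineUp commands)

-- ===== LEMMAS AND PROOFS =====
theorem lineUp_stepA_L (s c cnt : Int) :
    lineUpStepA (s, c, cnt) 'L' =
      if (s + 1) % 4 = (c - 1) % 4 then (s + 1, c - 1, cnt + 1) else (s + 1, c - 1, cnt) := by
  simp [lineUpStepA, show PySem.Dict.getD lineUpDirection 'L' 0 = 1 from rfl]

theorem lineUp_stepA_R (s c cnt : Int) :
    lineUpStepA (s, c, cnt) 'R' =
      if (s + -1) % 4 = (c + 1) % 4 then (s + -1, c + 1, cnt + 1) else (s + -1, c + 1, cnt) := by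
  simp [lineUpStepA, show PySem.Dict.getD lineUpDirection 'R' 0 = -1 from rfl]

theorem lineUp_stepA_A (s c cnt : Int) :
    lineUpStepA (s, c, cnt) 'A' =
      if (s + 2) % 4 = (c + 2) % 4 then (s + 2, c + 2, cnt + 1) else (s + 2, c + 2, cnt) := by
  simp [lineUpStepA, show PySem.Dict.getD lineUpDirection 'A' 0 = 2 from rfl]

theorem lineUp_stepB_LR (cnt : Int) (b : Bool) (x : Char)
    (hx : PySem.Dict.getD lineUpTurn x false = true) :
    lineUpStepB (cnt, b) x = (if b then cnt + 1 else cnt, !b) := by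
  cases b <;> simp [lineUpStepB, hx]

theorem lineUp_stepB_A (cnt : Int) (b : Bool) :
    lineUpStepB (cnt, b) 'A' = (if b then cnt else cnt + 1, b) := by
  cases b <;> simp [lineUpStepB, show PySem.Dict.getD lineUpTurn 'A' false = false from rfl]

-- Invariant: smart - confused ≡ 2 (mod 4) exactly when the parity bit is set, and the counters agree.
theorem lineUp_inv (l : List Char) (s c cnt : Int) (b : Bool)
    (hl : ∀ x ∈ l, x = 'L' ∨ x = 'R' ∨ x = 'A')
    (h : (s - c) % 4 = if b then 2 else 0) :
    (l.foldl lineUpStepA (s, c, cnt)).2.2 = (l.foldl lineUpStepB (cnt, b)).1 := by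
  induction l generalizing s c cnt b with
  | nil => rfl
  | cons x xs ih =>
    have hxs : ∀ y ∈ xs, y = 'L' ∨ y = 'R' ∨ y = 'A' := fun y hy => hl y (List.mem_cons_of_mem _ hy)
    rw [List.foldl_cons, List.foldl_cons]
    rcases hl x (List.mem_cons_self ..) with hx | hx | hx <;> subst hx
    · rw [lineUp_stepA_L, lineUp_stepB_LR cnt b 'L' rfl]
      cases b with
      | false =>
        rw [if_neg (by simp at h; omega)]
        simpa using ih _ _ _ true hxs (by simp at h ⊢; omega)
      | true =>
        rw [if_pos (by simp at h; omega)]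
        simpa using ih _ _ _ false hxs (by simp at h ⊢; omega)
    · rw [lineUp_stepA_R, lineUp_stepB_LR cnt b 'R' rfl]
      cases b with
      | false =>
        rw [if_neg (by simp at h; omega)]
        simpa using ih _ _ _ true hxs (by simp at h ⊢; omega)
      | true =>
        rw [if_pos (by simp at h; omega)]
        simpa using ih _ _ _ false hxs (by simp at h ⊢; omega)
    · rw [lineUp_stepA_A, lineUp_stepB_A]
      cases b with
      | false =>
        rw [if_pos (by simp at h; omega)]
        simpa using ih _ _ _ false hxs (by simp at h ⊢; omega)
      | true =>
        rw [if_neg (by simp at h; omega)]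
        simpa using ih _ _ _ true hxs (by simp at h ⊢; omega)

-- ===== VERDICT (by name: the statement is the Claim_ definition above) =====
theorem lineUp_spec : Claim_equal_lineUp := by
  intro commands _ hpre
  unfold Pre_lineUp at hpre
  simp only [List.all_eq_true, Bool.or_eq_true, beq_iff_eq] at hpre
  unfold Spec_lineUp lineUp lineUp_alt
  exact lineUp_inv commands.toList 0 0 0 false (fun x hx => (hpre x hx).elim (fun h => h.elim Or.inl (Or.inr ∘ Or.inl)) (Or.inr ∘ Or.inr)) (by decide)
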